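-- pv_equiv track=rewrite | github.com/RedKnite5/Junk | factor_func.py | conv_li
-- ===== SOURCE A (Python) =====
-- def count(co):
-- 	x=0
-- 	for i in co:
-- 		if i > x:
-- 			x=i
-- 	return(x)
--
-- def conv_li(dict):
-- 	ans = []
-- 	x=count(dict)
-- 	for i in range(x,-1,-1):
-- 		if i in dict:
-- 			ans.append(dict[i])
-- 		else:
-- 			ans.append(0)
-- 	return(ans)
-- ===== SOURCE B (Python) =====
-- def conv_li(dict):
--     x = 0
--     for k in dict:
--         if k > x:
--             x = k
--     ans = [0] * (x + 1)
--     for k, v in dict.items():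
--         if k >= 0:
--             ans[x - k] = v
--     return ans
-- ===== Notes on version B (the rewrite author's own statement) =====
-- stated objective: alternative
-- what changed: B replaces A's per-index membership-test gather (for each i from max down to 0, test i in dict and look it up) by a zero-filled preallocated list and a single scatter pass over dict.items() writing each non-negative key's value at position x-k; the constant-factor win is avoiding one interpreted loop iteration with a membership test and an append per output position.
import Mathlib
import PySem

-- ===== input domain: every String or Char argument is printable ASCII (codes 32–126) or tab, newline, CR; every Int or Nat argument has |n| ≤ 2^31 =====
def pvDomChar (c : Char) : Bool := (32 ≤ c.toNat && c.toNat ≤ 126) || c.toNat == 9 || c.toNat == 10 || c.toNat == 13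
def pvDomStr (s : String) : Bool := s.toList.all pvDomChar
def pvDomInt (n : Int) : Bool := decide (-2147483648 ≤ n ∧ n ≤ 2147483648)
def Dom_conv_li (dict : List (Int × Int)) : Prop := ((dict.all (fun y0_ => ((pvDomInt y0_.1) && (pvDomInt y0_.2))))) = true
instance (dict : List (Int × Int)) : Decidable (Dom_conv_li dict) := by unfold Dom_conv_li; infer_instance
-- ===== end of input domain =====

-- B replaces A's per-index membership-test gather by a preallocated zero list filled
-- by one scatter pass over the dict's items (alternative decomposition, same cost).


-- ===== PORT A =====
-- helper 'count(co)': the running-maximum loop starting at 0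
def countA (co : List Int) : Int :=
  co.foldl (fun x i => if i > x then i else x) 0

-- 'dict[i]': first-match association-list lookup (exact: the guard 'i in dict'
-- makes the .getD 0 default unreachable, so no KeyError case arises)
def lookupA (d : List (Int × Int)) (i : Int) : Int :=
  ((d.find? (fun p => p.1 == i)).map Prod.snd).getD 0

def conv_li (dict : List (Int × Int)) : List Int :=
  let ans : List Int := []
  let x := countA (dict.map Prod.fst)     -- 'for i in co' iterates the keys
  (PySem.List.pyRange x (-1) (-1)).foldl
    (fun ans i =>
      if (dict.map Prod.fst).contains i then ans ++ [lookupA dict i]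
      else ans ++ [(0 : Int)]) ans

-- ===== PORT B =====
def conv_li_alt (dict : List (Int × Int)) : List Int :=
  let x := dict.foldl (fun x p => if p.1 > x then p.1 else x) 0
  let ans := List.replicate (x + 1).toNat (0 : Int)
  dict.foldl (fun ans p => if p.1 ≥ 0 then ans.set (x - p.1).toNat p.2 else ans) ans

-- ===== PRECONDITION & SPEC =====
-- Pre_ excludes association lists with duplicate keys: they cannot arise from a
-- Python dict argument, and on them the first-vs-last-match choice is accidental.
def Pre_conv_li (dict : List (Int × Int)) : Prop := (dict.map Prod.fst).Nodup
instance (dict : List (Int × Int)) : Decidable (Pre_conv_li dict) := by unfold Pre_conv_li; infer_instance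
def pvWitness_conv_li : (List (Int × Int)) := [(2, 5), (0, 7), (-1, 3)]

def Spec_conv_li (dict : List (Int × Int)) (out : List Int) : Prop := out = conv_li_alt dict
instance (dict : List (Int × Int)) (out : List Int) : Decidable (Spec_conv_li dict out) := by unfold Spec_conv_li; infer_instance

-- ===== CLAIM (what is proved, stated in full; the proofs are below) =====
def Claim_equal_conv_li : Prop := ∀ (dict : List (Int × Int)), Dom_conv_li dict → Pre_conv_li dict → Spec_conv_li dict (conv_li dict)

-- ===== LEMMAS AND PROOFS =====

-- the running-maximum fold dominates its start value
lemma foldl_rmax_le_start (l : List Int) (a : Int) :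
    a ≤ l.foldl (fun x i => if i > x then i else x) a := by
  induction l generalizing a with
  | nil => simp
  | cons h t ih =>
    simp only [List.foldl_cons]
    exact le_trans (by split <;> omega) (ih _)

-- the running-maximum fold dominates every element
lemma mem_le_foldl_rmax (l : List Int) (a i : Int) (hi : i ∈ l) :
    i ≤ l.foldl (fun x i => if i > x then i else x) a := by
  induction l generalizing a with
  | nil => cases hi
  | cons h t ih =>
    simp only [List.foldl_cons]
    rcases List.mem_cons.mp hi with rfl | hmem
    · exact le_trans (by split <;> omega) (foldl_rmax_le_start t _)
    · exact ih _ hmem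

-- membership among keys equals success of the first-match search
lemma contains_keys_eq_isSome_find? (d : List (Int × Int)) (i : Int) :
    (d.map Prod.fst).contains i = (d.find? (fun p => p.1 == i)).isSome := by
  induction d with
  | nil => rfl
  | cons h t ih =>
    rw [List.map_cons, List.contains_cons, List.find?_cons]
    by_cases hk : h.1 = i
    · have hb : (h.1 == i) = true := beq_iff_eq.mpr hk
      have hb2 : (i == h.1) = true := beq_iff_eq.mpr hk.symm
      rw [hb, hb2]
      rfl
    · have h1 : (i == h.1) = false := beq_eq_false_iff_ne.mpr (fun e => hk e.symm)
      have h2 : (h.1 == i) = false := beq_eq_false_iff_ne.mpr hk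
      rw [h1, h2, Bool.false_or]
      exact ih

-- the core scatter invariant: after folding the writes over d, position j holds
-- the first value bound to key x - j, or the original entry if that key is absent
lemma scatter_get (x : Int) (d : List (Int × Int)) (ans : List Int)
    (hnd : (d.map Prod.fst).Nodup) (hle : ∀ p ∈ d, p.1 ≤ x)
    (j : Nat) (hj : j < ans.length) (hjx : (j : Int) ≤ x) :
    (d.foldl (fun ans p => if p.1 ≥ 0 then ans.set (x - p.1).toNat p.2 else ans) ans)[j]? =
      ((d.find? (fun p => p.1 == x - (j : Int))).map Prod.snd).or ans[j]? := by
  induction d generalizing ans with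
  | nil => simp
  | cons p t ih =>
    obtain ⟨k, v⟩ := p
    simp only [List.map_cons, List.nodup_cons] at hnd
    have hkx : k ≤ x := hle (k, v) (List.mem_cons_self ..)
    have hlet : ∀ q ∈ t, q.1 ≤ x := fun q hq => hle q (List.mem_cons_of_mem _ hq)
    simp only [List.foldl_cons, List.find?_cons]
    by_cases hk : k = x - (j : Int)
    · -- the head writes exactly position j; no later entry touches key x - j
      have hk0 : k ≥ 0 := by omega
      have hfind : t.find? (fun p => p.1 == x - (j : Int)) = none := by
        rw [List.find?_eq_none]
        intro q hq hqk
        exact hnd.1 (hk ▸ (by simpa using hqk) ▸ List.mem_map_of_mem hq)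
      have hidx : (x - k).toNat = j := by omega
      rw [if_pos hk0, ih _ hnd.2 hlet (by simpa [hidx] using hj)]
      simp only [hfind, hk, beq_self_eq_true, Option.map_none, Option.none_or,
        Option.map_some]
      have hidx' : (x - (x - (j : Int))).toNat = j := by omega
      rw [hidx', List.getElem?_set_self hj]
      simp
    · -- the head writes a different position (or nothing); pass through
      have hbeq : (k == x - (j : Int)) = false := by simpa using hk
      have hpass : (if k ≥ 0 then ans.set (x - k).toNat v else ans)[j]? = ans[j]? := by
        split
        · have : (x - k).toNat ≠ j := by omega
          exact List.getElem?_set_ne this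
        · rfl
      have hlen : (if k ≥ 0 then ans.set (x - k).toNat v else ans).length = ans.length := by
        split <;> simp
      rw [ih _ hnd.2 hlet (by simpa [hlen] using hj), hbeq, hpass]

-- the scatter fold preserves the list length
lemma scatter_length (x : Int) (d : List (Int × Int)) (ans : List Int) :
    (d.foldl (fun ans p => if p.1 ≥ 0 then ans.set (x - p.1).toNat p.2 else ans) ans).length
      = ans.length := by
  induction d generalizing ans with
  | nil => rfl
  | cons p t ih =>
    simp only [List.foldl_cons]
    rw [ih]
    split <;> simp

-- ===== VERDICT (by name: the statement is the Claim_ definition above) =====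
theorem conv_li_spec : Claim_equal_conv_li := by
  intro dict _ hpre
  unfold Spec_conv_li conv_li conv_li_alt
  simp only []
  set x := countA (dict.map Prod.fst) with hxdef
  have hxB : dict.foldl (fun x p => if p.1 > x then p.1 else x) 0 = x := by
    rw [hxdef]; unfold countA
    rw [List.foldl_map]
  have hx0 : 0 ≤ x := foldl_rmax_le_start _ 0
  have hkey : ∀ p ∈ dict, p.1 ≤ x := by
    intro p hp
    exact mem_le_foldl_rmax _ 0 _ (List.mem_map_of_mem hp)
  rw [hxB]
  -- A's gather is a map over the countdown range
  have hA : (PySem.List.pyRange x (-1) (-1)).foldl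
      (fun ans i => if (dict.map Prod.fst).contains i then ans ++ [lookupA dict i]
                    else ans ++ [(0 : Int)]) [] =
      (PySem.List.pyRange x (-1) (-1)).map
        (fun i => if (dict.map Prod.fst).contains i then lookupA dict i else 0) := by
    have h := PySem.List.foldl_append_singleton_eq_map
      (f := fun i => if (dict.map Prod.fst).contains i then lookupA dict i else 0)
      (l := PySem.List.pyRange x (-1) (-1)) (acc := ([] : List Int))
    simp only [List.nil_append] at h
    rw [← h]
    congr 1
    funext ans i
    split <;> rfl
  rw [hA, PySem.List.pyRange_neg_one, List.map_map]
  have hlenrep : (List.replicate (x + 1).toNat (0 : Int)).length = (x + 1).toNat := by simp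
  apply List.ext_getElem?
  intro j
  by_cases hj : j < (x + 1).toNat
  · have hjx : (j : Int) ≤ x := by omega
    have hget := scatter_get x dict (List.replicate (x + 1).toNat 0) hpre hkey j
      (by simpa [hlenrep] using hj) hjx
    rw [hget]
    have hrg : (x - (-1)).toNat = (x + 1).toNat := by omega
    rw [hrg, List.getElem?_map, List.getElem?_range hj]
    simp only [Function.comp, Option.map_some]
    rw [contains_keys_eq_isSome_find?]
    rw [List.getElem?_replicate, if_pos hj]
    cases hfind : dict.find? (fun p => p.1 == x - (j : Int)) with
    | none => simp
    | some q => simp [lookupA, hfind]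
  · have h2 : (dict.foldl (fun ans p => if p.1 ≥ 0 then ans.set (x - p.1).toNat p.2 else ans)
        (List.replicate (x + 1).toNat 0))[j]? = none := by
      apply List.getElem?_eq_none
      rw [scatter_length, hlenrep]; omega
    rw [h2]
    apply List.getElem?_eq_none
    simp only [List.length_map, List.length_range]
    omega
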